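-- pv_equiv track=rewrite | github.com/byeungoo/algorithmStudy | 2018 KAKAO BLIND RECRUITMENT/방금그곡/bokeun_kakao_2018_3_4.py | convert_chords
-- ===== SOURCE A (Python) =====
-- def convert_chords(chords: str):
--     converted = []
--
--     stack = []
--     for chord in chords:
--         if chord == "#" or len(stack) == 0:
--             stack.append(chord)
--         else:
--             converted.append("".join(stack))
--             stack = [chord]
--     if len(stack) > 0:
--         converted.append("".join(stack))
--
--     return converted
-- ===== SOURCE B (Python) =====
-- def convert_chords(chords: str):
--     result = []
--     for c in chords:
--         if c == "#" and result:
--             result[-1] += "#"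
--         else:
--             result.append(c)
--     return result
-- ===== Notes on version B (the rewrite author's own statement) =====
-- stated objective: simpler
-- what changed: Builds the token list directly, appending each sharp character onto the last emitted token, eliminating A's intermediate stack buffer, the per-token join and the final flush step.
import Mathlib
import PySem

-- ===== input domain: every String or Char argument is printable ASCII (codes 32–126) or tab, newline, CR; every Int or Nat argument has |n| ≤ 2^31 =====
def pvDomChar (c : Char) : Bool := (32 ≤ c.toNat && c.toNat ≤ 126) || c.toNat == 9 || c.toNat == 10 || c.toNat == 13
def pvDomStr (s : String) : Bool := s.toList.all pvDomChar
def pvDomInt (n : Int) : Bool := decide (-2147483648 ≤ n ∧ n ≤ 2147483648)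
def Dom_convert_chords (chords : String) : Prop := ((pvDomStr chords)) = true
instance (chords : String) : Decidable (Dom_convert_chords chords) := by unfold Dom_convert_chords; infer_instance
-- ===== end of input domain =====

-- B replaces A's stack buffer + final flush by appending each '#' directly onto the last emitted token (objective: simpler).

-- ===== PORT A =====
-- A's for-loop over the chars, carrying (converted, stack) exactly as the Python does.
def convertChordsLoopA : List Char → List String → List Char → List String
  | [], converted, stack =>
      if stack.length > 0 then converted ++ [String.ofList stack] else converted
  | c :: cs, converted, stack =>
      if c = '#' ∨ stack.length = 0 then
        convertChordsLoopA cs converted (stack ++ [c])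
      else
        convertChordsLoopA cs (converted ++ [String.ofList stack]) [c]

def convert_chords (chords : String) : List String :=
  convertChordsLoopA chords.toList [] []

-- ===== PORT B =====
-- result[-1] += "#": append "#" to the last element of the list.
def convertChordsAddSharp : List String → List String
  | [] => []
  | [s] => [s ++ "#"]
  | s :: t :: rest => s :: convertChordsAddSharp (t :: rest)

def convertChordsLoopB : List Char → List String → List String
  | [], result => result
  | c :: cs, result =>
      if c = '#' ∧ result ≠ [] then
        convertChordsLoopB cs (convertChordsAddSharp result)
      else
        convertChordsLoopB cs (result ++ [String.ofList [c]])

def convert_chords_alt (chords : String) : List String :=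
  convertChordsLoopB chords.toList []

-- ===== PRECONDITION & SPEC =====
def Spec_convert_chords (chords : String) (out : List String) : Prop := out = convert_chords_alt chords
instance (chords : String) (out : List String) : Decidable (Spec_convert_chords chords out) := by unfold Spec_convert_chords; infer_instance

-- ===== CLAIM (what is proved, stated in full; the proofs are below) =====
def Claim_equal_convert_chords : Prop := ∀ (chords : String), Dom_convert_chords chords → Spec_convert_chords chords (convert_chords chords)

-- ===== LEMMAS AND PROOFS =====

lemma convertChordsAddSharp_append (l : List String) (s : String) :
    convertChordsAddSharp (l ++ [s]) = l ++ [s ++ "#"] := by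
  induction l with
  | nil => simp [convertChordsAddSharp]
  | cons a t ih =>
      cases t with
      | nil => simp [convertChordsAddSharp]
      | cons b t' => simpa [convertChordsAddSharp] using ih

lemma String_mk_append (a b : List Char) : String.ofList (a ++ b) = String.ofList a ++ String.ofList b := by
  simp

lemma convertChords_key (cs : List Char) :
    ∀ (conv : List String) (stack : List Char), stack ≠ [] →
      convertChordsLoopA cs conv stack = convertChordsLoopB cs (conv ++ [String.ofList stack]) := by
  induction cs with
  | nil =>
      intro conv stack h
      have : stack.length > 0 := List.length_pos_of_ne_nil h
      simp [convertChordsLoopA, convertChordsLoopB, this]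
  | cons c cs ih =>
      intro conv stack h
      by_cases hc : c = '#'
      · subst hc
        have hA : convertChordsLoopA ('#' :: cs) conv stack
            = convertChordsLoopA cs conv (stack ++ ['#']) := by
          simp [convertChordsLoopA]
        have hB : convertChordsLoopB ('#' :: cs) (conv ++ [String.ofList stack])
            = convertChordsLoopB cs (convertChordsAddSharp (conv ++ [String.ofList stack])) := by
          simp [convertChordsLoopB]
        rw [hA, hB, convertChordsAddSharp_append,
            ih conv (stack ++ ['#']) (by simp)]
        congr 2
        rw [String_mk_append]
      · have hlen : ¬ stack.length = 0 := by
          simpa [List.length_eq_zero_iff] using h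
        have hA : convertChordsLoopA (c :: cs) conv stack
            = convertChordsLoopA cs (conv ++ [String.ofList stack]) [c] := by
          simp [convertChordsLoopA, hc, hlen]
        have hB : convertChordsLoopB (c :: cs) (conv ++ [String.ofList stack])
            = convertChordsLoopB cs ((conv ++ [String.ofList stack]) ++ [String.ofList [c]]) := by
          simp [convertChordsLoopB, hc]
        rw [hA, hB, ih (conv ++ [String.ofList stack]) [c] (by simp)]

lemma convertChords_eq (chords : String) : convert_chords chords = convert_chords_alt chords := by
  unfold convert_chords convert_chords_alt
  cases h : chords.toList with
  | nil => simp [convertChordsLoopA, convertChordsLoopB]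
  | cons c cs =>
      have hA : convertChordsLoopA (c :: cs) [] []
          = convertChordsLoopA cs [] [c] := by
        simp [convertChordsLoopA]
      have hB : convertChordsLoopB (c :: cs) []
          = convertChordsLoopB cs [String.ofList [c]] := by
        simp [convertChordsLoopB]
      rw [hA, hB]
      simpa using convertChords_key cs [] [c] (by simp)

-- ===== VERDICT (by name: the statement is the Claim_ definition above) =====
theorem convert_chords_spec : Claim_equal_convert_chords := by
  intro chords _
  exact convertChords_eq chords
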